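-- pv_equiv track=rewrite | github.com/davidmalcolm/patch-finder | patch-finder.py | extract_patch
-- ===== SOURCE A (Python) =====
-- def extract_patch(body):
--     """
--     Attempt to extract a patch from the body of a mail scraped from a
--     mailing-list archive.
--     Return a str, or None
--     """
--     within_patch = False
--     patch = None
--     for line in body.splitlines():
--         if within_patch:
--             if line == '':
--                 # Blank line within a patch
--                 patch += '\n'
--                 continue
--             if line[0] not in '-+@ ':
--                 # End of patch
--                 return patch.rstrip() + '\n'
--             patch += line + '\n'
--             continue
--         else:
--             # We're before the patch started
--             if line.startswith('--- '):
--                 within_patch = True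
--                 patch = line + '\n'
--                 continue
--             # Otherwise, discard leading test.
--     if within_patch:
--         # The patch continued to the end of the body:
--         return patch
-- ===== SOURCE B (Python) =====
-- def extract_patch(body):
--     """
--     Attempt to extract a patch from the body of a mail scraped from a
--     mailing-list archive.
--     Return a str, or None
--     """
--     lines = body.splitlines()
--     starts = [i for i, line in enumerate(lines) if line.startswith('--- ')]
--     if not starts:
--         return None
--     start = starts[0]
--     breaks = [i for i, line in enumerate(lines)
--               if i > start and line and line[0] not in '-+@ ']
--     if breaks:
--         return '\n'.join(lines[start:breaks[0]]).rstrip() + '\n'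
--     return '\n'.join(lines[start:]) + '\n'
-- ===== Notes on version B (the rewrite author's own statement) =====
-- stated objective: alternative
-- what changed: Replaces A's single stateful accumulator loop (within_patch flag, patch string grown line by line) by an index-and-slice algorithm: two enumerate/filter comprehensions compute the header index and the first terminating-line index, and the result is built in one shot by joining the corresponding slice of the line list.
import Mathlib
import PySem

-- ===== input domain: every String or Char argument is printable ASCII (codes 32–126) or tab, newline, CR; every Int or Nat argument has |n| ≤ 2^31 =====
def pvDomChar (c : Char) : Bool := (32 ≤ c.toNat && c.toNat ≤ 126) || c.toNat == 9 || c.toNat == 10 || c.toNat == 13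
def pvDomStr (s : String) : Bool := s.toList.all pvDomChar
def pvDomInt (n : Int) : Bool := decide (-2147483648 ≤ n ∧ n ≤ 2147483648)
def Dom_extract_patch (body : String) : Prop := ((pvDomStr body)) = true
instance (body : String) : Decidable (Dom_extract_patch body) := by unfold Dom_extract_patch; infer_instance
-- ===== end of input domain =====

-- B drops A's stateful accumulator loop entirely: it computes the two boundary indices
-- (first '--- ' header line, first later terminating line) with enumerate/filter
-- comprehensions and builds the result in one shot by joining a slice of the line list.

-- ===== PORT A =====
-- inner loop of A once within_patch is True (strings handled as List Char)
def pvLoopA : List (List Char) → List Char → List Char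
  | [], patch => patch
  | l :: ls, patch =>
    match l with
    | [] => pvLoopA ls (patch ++ ['\n'])            -- blank line within a patch
    | c :: rest =>
      if !(PySem.Chars.isIn [c] ['-', '+', '@', ' ']) then
        PySem.Chars.rstrip patch ++ ['\n']          -- end of patch
      else
        pvLoopA ls (patch ++ (c :: rest) ++ ['\n'])

-- outer loop of A while within_patch is False (discard leading text)
def pvPreA : List (List Char) → Option (List Char)
  | [] => none
  | l :: ls =>
    if PySem.Chars.startswith l ("--- ".toList) then
      some (pvLoopA ls (l ++ ['\n']))
    else
      pvPreA ls

def extract_patch (body : String) : Option String :=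
  (pvPreA ((PySem.Str.splitlines body).map String.toList)).map String.ofList

-- ===== PORT B =====
-- line.startswith('--- ')
def pvHdrB (l : List Char) : Bool := PySem.Chars.startswith l ("--- ".toList)

-- line and line[0] not in '-+@ '  (headD is only reached on a nonempty line)
def pvBrkB (l : List Char) : Bool :=
  !l.isEmpty && !(PySem.Chars.isIn [l.headD ' '] ['-', '+', '@', ' '])

def extract_patch_alt (body : String) : Option String :=
  let lines := (PySem.Str.splitlines body).map String.toList
  let starts := (PySem.List.enumerate lines).filter (fun p => pvHdrB p.2)
  match starts with
  | [] => none
  | (start, _) :: _ =>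
    let breaks := (PySem.List.enumerate lines).filter
      (fun p => decide (start < p.1) && pvBrkB p.2)
    match breaks with
    | (b, _) :: _ =>
      some (String.ofList (PySem.Chars.rstrip
        (PySem.Chars.join ['\n'] (PySem.List.slice lines (some start) (some b))) ++ ['\n']))
    | [] =>
      some (String.ofList (PySem.Chars.join ['\n'] (PySem.List.slice lines (some start) none) ++ ['\n']))

-- ===== PRECONDITION & SPEC =====
def Spec_extract_patch (body : String) (out : Option String) : Prop := out = extract_patch_alt body
instance (body : String) (out : Option String) : Decidable (Spec_extract_patch body out) := by unfold Spec_extract_patch; infer_instance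

-- ===== CLAIM (what is proved, stated in full; the proofs are below) =====
def Claim_equal_extract_patch : Prop := ∀ (body : String), Dom_extract_patch body → Spec_extract_patch body (extract_patch body)

-- ===== LEMMAS AND PROOFS =====

-- concatenation of line + '\n' for each line, the value A's accumulator holds
def pvJoinN : List (List Char) → List Char
  | [] => []
  | l :: ls => l ++ '\n' :: pvJoinN ls

theorem pvRstrip_newline (y : List Char) :
    PySem.Chars.rstrip (y ++ ['\n']) = PySem.Chars.rstrip y := by
  simp [PySem.Chars.rstrip, PySem.Chars.isspace]

theorem pvJoin_eq_joinN (x : List Char) (xs : List (List Char)) :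
    PySem.Chars.join ['\n'] (x :: xs) ++ ['\n'] = pvJoinN (x :: xs) := by
  induction xs generalizing x with
  | nil => simp [PySem.Chars.join_singleton, pvJoinN]
  | cons y ys ih =>
    rw [PySem.Chars.join_cons_cons, List.append_assoc, List.append_assoc, ih y]
    simp [pvJoinN]

theorem pvLoopA_canon (ls : List (List Char)) (patch : List Char) :
    pvLoopA ls patch =
      match ls.findIdx? pvBrkB with
      | none => patch ++ pvJoinN ls
      | some j => PySem.Chars.rstrip (patch ++ pvJoinN (ls.take j)) ++ ['\n'] := by
  induction ls generalizing patch with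
  | nil => simp [pvLoopA, pvJoinN]
  | cons l ls ih =>
    cases l with
    | nil =>
      rw [show pvLoopA ([] :: ls) patch = pvLoopA ls (patch ++ ['\n']) from rfl, ih]
      simp only [List.findIdx?_cons, show pvBrkB [] = false from rfl, Bool.false_eq_true,
        if_false]
      cases h : ls.findIdx? pvBrkB <;> simp [pvJoinN]
    | cons c rest =>
      by_cases hc : PySem.Chars.isIn [c] ['-', '+', '@', ' '] = true
      · have hb : pvBrkB (c :: rest) = false := by simp [pvBrkB, hc]
        rw [show pvLoopA ((c :: rest) :: ls) patch
            = pvLoopA ls (patch ++ (c :: rest) ++ ['\n']) from by simp [pvLoopA, hc], ih]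
        simp only [List.findIdx?_cons, hb, Bool.false_eq_true, if_false]
        cases h : ls.findIdx? pvBrkB <;> simp [pvJoinN]
      · have hb : pvBrkB (c :: rest) = true := by
          simp only [Bool.not_eq_true] at hc
          simp [pvBrkB, hc]
        rw [show pvLoopA ((c :: rest) :: ls) patch
            = PySem.Chars.rstrip patch ++ ['\n'] from by
          simp only [Bool.not_eq_true] at hc
          simp [pvLoopA, hc]]
        simp [List.findIdx?_cons, hb, pvJoinN]

theorem pvPreA_canon (ls : List (List Char)) :
    pvPreA ls =
      match ls.findIdx? pvHdrB with
      | none => none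
      | some i => some (pvLoopA (ls.drop (i + 1)) (ls.getD i [] ++ ['\n'])) := by
  induction ls with
  | nil => rfl
  | cons l ls ih =>
    by_cases h : pvHdrB l = true
    · simp only [pvPreA]
      rw [if_pos (by simpa [pvHdrB] using h)]
      simp [List.findIdx?_cons, h, List.getD]
    · simp only [pvPreA]
      rw [if_neg (by simpa [pvHdrB] using h), ih]
      simp only [List.findIdx?_cons, h, Bool.false_eq_true, if_false]
      cases hf : ls.findIdx? pvHdrB with
      | none => simp
      | some v => simp [List.getD]

-- first index selected by an enumerate/filter comprehension = findIdx? shifted by the start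
theorem pvFiltEnum_head (pred : List Char → Bool) (xs : List (List Char)) (s : Int) :
    (((PySem.List.enumerate xs s).filter (fun p => pred p.2)).head?).map Prod.fst
      = Option.map (fun j : Nat => s + (j : Int)) (xs.findIdx? pred) := by
  induction xs generalizing s with
  | nil => simp [PySem.List.enumerate]
  | cons x xs ih =>
    rw [PySem.List.enumerate_cons, List.filter_cons]
    by_cases h : pred x = true
    · simp [h, List.findIdx?_cons]
    · simp only [h, Bool.false_eq_true, if_false, List.findIdx?_cons]
      rw [ih (s + 1)]
      cases hf : xs.findIdx? pred with
      | none => simp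
      | some v =>
        simp only [Option.map_some, Option.some.injEq]
        omega

-- the break comprehension: entries up to index i are filtered out by 'i < p.1'
theorem pvBreaks_head (xs : List (List Char)) (i : Nat) (hi : i < xs.length) :
    (((PySem.List.enumerate xs 0).filter
        (fun p => decide ((i : Int) < p.1) && pvBrkB p.2)).head?).map Prod.fst
      = Option.map (fun j : Nat => (i : Int) + 1 + (j : Int)) ((xs.drop (i + 1)).findIdx? pvBrkB) := by
  have hsplit : xs = xs.take (i + 1) ++ xs.drop (i + 1) := (List.take_append_drop _ _).symm
  rw [show (PySem.List.enumerate xs 0)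
        = PySem.List.enumerate (xs.take (i + 1)) 0
          ++ PySem.List.enumerate (xs.drop (i + 1)) (0 + (xs.take (i + 1)).length) from by
      rw [← PySem.List.enumerate_append, ← hsplit]]
  have hlen : (xs.take (i + 1)).length = i + 1 := by
    rw [List.length_take]
    omega
  rw [List.filter_append]
  have h1 : (PySem.List.enumerate (xs.take (i + 1)) 0).filter
      (fun p => decide ((i : Int) < p.1) && pvBrkB p.2) = [] := by
    rw [List.filter_eq_nil_iff]
    intro p hp
    rw [PySem.List.mem_enumerate_iff] at hp
    obtain ⟨k, hk, rfl⟩ := hp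
    rw [hlen] at hk
    simp only [Bool.and_eq_true, decide_eq_true_eq, not_and]
    intro hlt
    omega
  have h2 : (PySem.List.enumerate (xs.drop (i + 1)) (0 + (xs.take (i + 1)).length)).filter
      (fun p => decide ((i : Int) < p.1) && pvBrkB p.2)
      = (PySem.List.enumerate (xs.drop (i + 1)) (0 + (xs.take (i + 1)).length)).filter
      (fun p => pvBrkB p.2) := by
    apply List.filter_congr
    intro p hp
    rw [PySem.List.mem_enumerate_iff] at hp
    obtain ⟨k, hk, rfl⟩ := hp
    rw [hlen]
    have : (i : Int) < 0 + (↑(i + 1) : Int) + (k : Int) := by push_cast; omega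
    simp only [this, decide_true, Bool.true_and]
  rw [h1, h2, List.nil_append, pvFiltEnum_head]
  cases hf : (xs.drop (i + 1)).findIdx? pvBrkB with
  | none => simp
  | some v =>
    simp only [Option.map_some, Option.some.injEq, hlen]
    omega

-- ===== VERDICT (by name: the statement is the Claim_ definition above) =====
theorem extract_patch_spec : Claim_equal_extract_patch := by
  intro body _
  simp only [Spec_extract_patch, extract_patch, extract_patch_alt]
  set lines := (PySem.Str.splitlines body).map String.toList with hlines
  rw [pvPreA_canon]
  have hstarts := pvFiltEnum_head pvHdrB lines 0
  cases hfh : lines.findIdx? pvHdrB with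
  | none =>
    rw [hfh] at hstarts
    simp only [Option.map_none, Option.map_eq_none_iff, List.head?_eq_none_iff] at hstarts
    simp [hstarts]
  | some i =>
    have hi : i < lines.length := (List.findIdx?_eq_some_iff_getElem.mp hfh).1
    rw [hfh] at hstarts
    cases hsl : (PySem.List.enumerate lines 0).filter (fun p => pvHdrB p.2) with
    | nil => rw [hsl] at hstarts; simp at hstarts
    | cons a rest =>
      obtain ⟨a1, a2⟩ := a
      rw [hsl] at hstarts
      simp only [List.head?_cons, Option.map_some] at hstarts
      have ha1 : a1 = (i : Int) := by simpa using hstarts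
      subst ha1
      dsimp only
      have hdropi : lines.drop i = lines.getD i [] :: lines.drop (i + 1) := by
        rw [List.getD_eq_getElem?_getD, List.getElem?_eq_getElem hi]
        simp
      have hbr := pvBreaks_head lines i hi
      cases hfb : (lines.drop (i + 1)).findIdx? pvBrkB with
      | none =>
        rw [hfb] at hbr
        simp only [Option.map_none, Option.map_eq_none_iff, List.head?_eq_none_iff] at hbr
        rw [hbr]
        dsimp only
        rw [pvLoopA_canon, hfb]
        rw [PySem.List.slice_from lines (by positivity)]
        simp only [Int.toNat_natCast]
        rw [hdropi, pvJoin_eq_joinN]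
        simp [pvJoinN]
      | some j =>
        rw [hfb] at hbr
        cases hbl : (PySem.List.enumerate lines 0).filter
            (fun p => decide ((i : Int) < p.1) && pvBrkB p.2) with
        | nil => rw [hbl] at hbr; simp at hbr
        | cons b brest =>
          obtain ⟨b1, b2⟩ := b
          rw [hbl] at hbr
          simp only [List.head?_cons, Option.map_some] at hbr
          have hb1 : b1 = (i : Int) + 1 + (j : Int) := by simpa using hbr
          subst hb1
          dsimp only
          have hslice : PySem.List.slice lines (some (i : Int)) (some ((i : Int) + 1 + (j : Int)))
              = lines.getD i [] :: (lines.drop (i + 1)).take j := by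
            have hcast : ((i : Int) + 1 + (j : Int)) = ((i + 1 + j : Nat) : Int) := by
              push_cast; ring
            rw [hcast, PySem.List.slice_natCast]
            have hsub : i + 1 + j - i = j + 1 := by omega
            rw [hsub, hdropi, List.take_succ_cons]
          rw [hslice, pvLoopA_canon, hfb]
          dsimp only
          have hjoin : lines.getD i [] ++ ['\n'] ++ pvJoinN ((lines.drop (i + 1)).take j)
              = PySem.Chars.join ['\n']
                  (lines.getD i [] :: (lines.drop (i + 1)).take j) ++ ['\n'] := by
            rw [pvJoin_eq_joinN]
            simp [pvJoinN]
          rw [hjoin, pvRstrip_newline]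
          simp
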